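-- pv_equiv track=rewrite | github.com/Pilot-NER/Resources | compiled.py | extract2
-- ===== SOURCE A (Python) =====
-- def extract2(ori,simp_list,ext1,ext2,ext3,ext4):
--     final_list = []
--     noExt_list = []
--     for x in range(len(ext1)):
--         if len(ext1[x]) > 2 and ext1[x] != '':
--             final_list.append(ext1[x])
--         elif len(ext4[x]) > 2 and ext4[x] != '':
--             final_list.append(ext4[x])
--         elif len(ext2[x]) > 2 and ext2[x] != '':
--             final_list.append(ext2[x])
--         elif len(ext3[x]) > 2 and ext3[x] != '':
--             final_list.append(ext3[x])
--         elif len(simp_list[x]) > 2: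
--             final_list.append(simp_list[x])
--         else:
--             final_list.append('')
--             noExt_list.append(ori[x])
--     return(final_list,noExt_list)
-- ===== SOURCE B (Python) =====
-- def extract2(ori, simp_list, ext1, ext2, ext3, ext4):
--     # Reverse-priority overwrite: start with all-empty results, then sweep the
--     # candidate lists from lowest to highest priority, overwriting wherever a
--     # candidate is long enough; highest priority (ext1) sweeps last and wins.
--     n = len(ext1)
--     final_list = [''] * n
--     for cand in (simp_list, ext3, ext2, ext4, ext1):
--         for x, v in enumerate(cand[:n]):
--             if len(v) > 2:
--                 final_list[x] = v
--     noExt_list = [o for o, f in zip(ori, final_list) if f == '']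
--     return (final_list, noExt_list)
-- ===== Notes on version B (the rewrite author's own statement) =====
-- stated objective: alternative
-- what changed: Replaces A's single pass with a five-way elif chain per index by a reverse-priority overwrite: final_list starts all-empty, each candidate list is swept in ascending priority (simp_list, ext3, ext2, ext4, ext1) overwriting positions whose entry is longer than 2 chars, and noExt_list is re-derived afterwards by zipping ori with the still-empty positions.
import Mathlib
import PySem

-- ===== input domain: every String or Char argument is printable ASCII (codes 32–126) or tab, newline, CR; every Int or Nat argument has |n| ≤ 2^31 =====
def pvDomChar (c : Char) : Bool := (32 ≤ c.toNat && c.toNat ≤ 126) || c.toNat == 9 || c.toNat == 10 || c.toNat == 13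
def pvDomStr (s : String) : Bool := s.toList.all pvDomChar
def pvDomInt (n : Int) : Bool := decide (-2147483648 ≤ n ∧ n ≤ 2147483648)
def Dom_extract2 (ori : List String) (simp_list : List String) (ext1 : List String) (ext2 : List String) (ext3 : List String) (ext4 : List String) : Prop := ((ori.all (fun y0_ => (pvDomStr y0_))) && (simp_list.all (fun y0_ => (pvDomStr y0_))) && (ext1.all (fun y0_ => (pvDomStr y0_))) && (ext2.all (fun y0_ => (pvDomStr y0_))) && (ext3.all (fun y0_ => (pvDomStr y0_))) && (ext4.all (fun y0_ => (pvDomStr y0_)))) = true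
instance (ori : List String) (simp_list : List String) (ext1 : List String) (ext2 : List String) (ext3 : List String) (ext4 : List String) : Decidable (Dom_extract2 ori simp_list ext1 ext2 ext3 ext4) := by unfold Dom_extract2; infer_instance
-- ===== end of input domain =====

-- B replaces A's per-index five-branch elif chain by reverse-priority overwrite sweeps over the candidate lists (alternative decomposition, same cost, return value only).


-- ===== PORT A =====
-- literal port of A: one loop over range(len(ext1)), nested elif chain, two accumulators.
-- list indexing is ported with getD ""; Pre_extract2 guarantees every index A actually evaluates is in range.
def extract2 (ori : List String) (simp_list : List String) (ext1 : List String) (ext2 : List String) (ext3 : List String) (ext4 : List String) : List String × List String :=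
  (List.range ext1.length).foldl
    (fun acc x =>
      let e1 := ext1.getD x ""
      if 2 < PySem.Str.len e1 ∧ e1 ≠ "" then (acc.1 ++ [e1], acc.2)
      else
        let e4 := ext4.getD x ""
        if 2 < PySem.Str.len e4 ∧ e4 ≠ "" then (acc.1 ++ [e4], acc.2)
        else
          let e2 := ext2.getD x ""
          if 2 < PySem.Str.len e2 ∧ e2 ≠ "" then (acc.1 ++ [e2], acc.2)
          else
            let e3 := ext3.getD x ""
            if 2 < PySem.Str.len e3 ∧ e3 ≠ "" then (acc.1 ++ [e3], acc.2)
            else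
              let s := simp_list.getD x ""
              if 2 < PySem.Str.len s then (acc.1 ++ [s], acc.2)
              else (acc.1 ++ [""], acc.2 ++ [ori.getD x ""]))
    ([], [])

-- ===== PORT B =====
-- one overwrite sweep: for x, v in enumerate(cand[:n]): if len(v) > 2: final_list[x] = v
-- (cand[:n] with n = len(ext1) ≥ 0 is exactly List.take n, cf. PySem.List.slice_to_natCast)
def pvPass (n : Nat) (fl cand : List String) : List String :=
  (PySem.List.enumerate (cand.take n) 0).foldl
    (fun fl p => if 2 < PySem.Str.len p.2 then PySem.List.pySetD fl p.1 p.2 else fl) fl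

def extract2_alt (ori : List String) (simp_list : List String) (ext1 : List String) (ext2 : List String) (ext3 : List String) (ext4 : List String) : List String × List String :=
  let n := ext1.length
  let final_list := [simp_list, ext3, ext2, ext4, ext1].foldl (pvPass n) (List.replicate n "")
  let noExt_list := ((ori.zip final_list).filter (fun p => p.2 == "")).map Prod.fst
  (final_list, noExt_list)

-- ===== PRECONDITION & SPEC =====
-- Pre_extract2 holds exactly where Python A returns: at each position the lazy elif chain must
-- find every list it actually indexes (ext4/ext2/ext3/simp_list, and ori in the fallback) long
-- enough; outside it A raises IndexError (B, which only sweeps existing entries, still returns).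
def Pre_extract2 (ori : List String) (simp_list : List String) (ext1 : List String) (ext2 : List String) (ext3 : List String) (ext4 : List String) : Prop :=
  ∀ x, x < ext1.length →
    (2 < PySem.Str.len (ext1.getD x "") ∨ (x < ext4.length ∧
      (2 < PySem.Str.len (ext4.getD x "") ∨ (x < ext2.length ∧
        (2 < PySem.Str.len (ext2.getD x "") ∨ (x < ext3.length ∧
          (2 < PySem.Str.len (ext3.getD x "") ∨ (x < simp_list.length ∧
            (2 < PySem.Str.len (simp_list.getD x "") ∨ x < ori.length)))))))))
instance (ori : List String) (simp_list : List String) (ext1 : List String) (ext2 : List String) (ext3 : List String) (ext4 : List String) : Decidable (Pre_extract2 ori simp_list ext1 ext2 ext3 ext4) := by unfold Pre_extract2; infer_instance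

def pvWitness_extract2 : List String × List String × List String × List String × List String × List String :=
  (["o"], ["sss"], ["abc", "x"], ["", "zzzz"], ["", ""], ["", ""])

def Spec_extract2 (ori : List String) (simp_list : List String) (ext1 : List String) (ext2 : List String) (ext3 : List String) (ext4 : List String) (out : List String × List String) : Prop := out = extract2_alt ori simp_list ext1 ext2 ext3 ext4
instance (ori : List String) (simp_list : List String) (ext1 : List String) (ext2 : List String) (ext3 : List String) (ext4 : List String) (out : List String × List String) : Decidable (Spec_extract2 ori simp_list ext1 ext2 ext3 ext4 out) := by unfold Spec_extract2; infer_instance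

-- ===== CLAIM (what is proved, stated in full; the proofs are below) =====
def Claim_equal_extract2 : Prop := ∀ (ori : List String) (simp_list : List String) (ext1 : List String) (ext2 : List String) (ext3 : List String) (ext4 : List String), Dom_extract2 ori simp_list ext1 ext2 ext3 ext4 → Pre_extract2 ori simp_list ext1 ext2 ext3 ext4 → Spec_extract2 ori simp_list ext1 ext2 ext3 ext4 (extract2 ori simp_list ext1 ext2 ext3 ext4)

-- ===== LEMMAS AND PROOFS =====

-- the first qualifying candidate at position x, in A's priority order (out-of-range reads as "")
def pvPick (simp_list : List String) (ext1 : List String) (ext2 : List String) (ext3 : List String) (ext4 : List String) (x : Nat) : String :=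
  (([ext1.getD x "", ext4.getD x "", ext2.getD x "", ext3.getD x "", simp_list.getD x ""].find?
      (fun c => decide (2 < PySem.Str.len c))).getD "")

-- A's fold over range n, characterised pointwise
theorem pv_loop_eq (ori simp_list ext1 ext2 ext3 ext4 : List String) (n : Nat) :
    (List.range n).foldl
      (fun acc x =>
        let e1 := ext1.getD x ""
        if 2 < PySem.Str.len e1 ∧ e1 ≠ "" then (acc.1 ++ [e1], acc.2)
        else
          let e4 := ext4.getD x ""
          if 2 < PySem.Str.len e4 ∧ e4 ≠ "" then (acc.1 ++ [e4], acc.2)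
          else
            let e2 := ext2.getD x ""
            if 2 < PySem.Str.len e2 ∧ e2 ≠ "" then (acc.1 ++ [e2], acc.2)
            else
              let e3 := ext3.getD x ""
              if 2 < PySem.Str.len e3 ∧ e3 ≠ "" then (acc.1 ++ [e3], acc.2)
              else
                let s := simp_list.getD x ""
                if 2 < PySem.Str.len s then (acc.1 ++ [s], acc.2)
                else (acc.1 ++ [""], acc.2 ++ [ori.getD x ""]))
      ([], [])
    = ((List.range n).map (pvPick simp_list ext1 ext2 ext3 ext4),
       ((List.range n).filter (fun x => pvPick simp_list ext1 ext2 ext3 ext4 x == "")).map (fun x => ori.getD x "")) := by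
  induction n with
  | zero => simp
  | succ m ih =>
    rw [List.range_succ, List.foldl_append, List.map_append, List.filter_append, ih]
    simp only [List.foldl_cons, List.foldl_nil, List.map_cons, List.map_nil, List.filter_cons,
      List.filter_nil]
    unfold pvPick
    simp only [List.find?]
    by_cases h1 : 2 < (ext1[m]?.getD "").length
    · have hne1 : ¬ ext1[m]?.getD "" = "" := by
        intro h; rw [h] at h1; simp at h1
      simp [h1, hne1]
    · by_cases h4 : 2 < (ext4[m]?.getD "").length
      · have hne4 : ¬ ext4[m]?.getD "" = "" := by
          intro h; rw [h] at h4; simp at h4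
        simp [h1, h4, hne4]
      · by_cases h2 : 2 < (ext2[m]?.getD "").length
        · have hne2 : ¬ ext2[m]?.getD "" = "" := by
            intro h; rw [h] at h2; simp at h2
          simp [h1, h4, h2, hne2]
        · by_cases h3 : 2 < (ext3[m]?.getD "").length
          · have hne3 : ¬ ext3[m]?.getD "" = "" := by
              intro h; rw [h] at h3; simp at h3
            simp [h1, h4, h2, h3, hne3]
          · by_cases hs : 2 < (simp_list[m]?.getD "").length
            · have hnes : ¬ simp_list[m]?.getD "" = "" := by
                intro h; rw [h] at hs; simp at hs
              simp [h1, h4, h2, h3, hs, hnes]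
            · simp [h1, h4, h2, h3, hs]

-- the sweep fold preserves length
theorem pv_length_sweep (ys : List String) (s : Int) (fl : List String) :
    ((PySem.List.enumerate ys s).foldl
      (fun fl p => if 2 < PySem.Str.len p.2 then PySem.List.pySetD fl p.1 p.2 else fl) fl).length
    = fl.length := by
  induction ys generalizing s fl with
  | nil => simp [PySem.List.enumerate_nil]
  | cons y ys ih =>
    rw [PySem.List.enumerate_cons, List.foldl_cons, ih]
    split <;> simp [PySem.List.length_pySetD]

-- pointwise effect of one sweep fold (indices s, s+1, ... are written with ys[0], ys[1], ...)
theorem pv_sweep_getElem? (ys : List String) (s : Nat) (fl : List String) (x : Nat) :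
    ((PySem.List.enumerate ys (s : Int)).foldl
      (fun fl p => if 2 < PySem.Str.len p.2 then PySem.List.pySetD fl p.1 p.2 else fl) fl)[x]?
    = if s ≤ x ∧ x - s < ys.length ∧ x < fl.length ∧ 2 < PySem.Str.len (ys.getD (x - s) "") then
        some (ys.getD (x - s) "")
      else fl[x]? := by
  induction ys generalizing s fl with
  | nil => simp [PySem.List.enumerate_nil]
  | cons y ys ih =>
    rw [PySem.List.enumerate_cons]
    have hc : (s : Int) + 1 = ((s + 1 : Nat) : Int) := by push_cast; ring
    rw [hc, List.foldl_cons]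
    rcases Nat.lt_trichotomy x s with hlt | heq | hgt
    · -- x < s: neither the head write (at s) nor the tail fold (indices ≥ s+1) touches x
      have hA : ¬ (s ≤ x) := by omega
      have hA1 : ¬ (s + 1 ≤ x) := by omega
      rw [ih]
      simp only [hA, hA1, false_and, if_false]
      split
      · simp [PySem.List.pySetD_natCast, List.getElem?_set, show ¬ (s = x) by omega]
      · rfl
    · -- x = s: the head write decides, the tail fold leaves position s alone
      subst heq
      rw [ih]
      have hA1 : ¬ (x + 1 ≤ x) := by omega
      simp only [hA1, false_and, if_false]
      have hgd : (y :: ys).getD (x - x) "" = y := by rw [Nat.sub_self]; rfl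
      rw [hgd]
      by_cases hq : 2 < PySem.Str.len y
      · simp only [if_pos hq, PySem.List.pySetD_natCast, List.getElem?_set, if_pos rfl]
        by_cases hfl : x < fl.length
        · simp [hfl, Nat.sub_self]
          intro h
          exfalso
          simp [PySem.Str.len_eq] at hq
          omega
        · rw [List.getElem?_eq_none (by omega)]
          simp [hfl]
      · simp only [if_neg hq]
        have : ¬ (x ≤ x ∧ x - x < (y :: ys).length ∧ x < fl.length ∧ 2 < PySem.Str.len y) := by
          intro h; exact hq h.2.2.2
        rw [if_neg this]
    · -- s < x: the head write (at s) misses x; the tail fold covers it via ih at s+1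
      have hgd : (y :: ys).getD (x - s) "" = ys.getD (x - (s + 1)) "" := by
        have h1 : x - s = (x - (s + 1)) + 1 := by omega
        rw [h1]; rfl
      have hiff : ∀ (m : Nat),
          (s + 1 ≤ x ∧ x - (s + 1) < ys.length ∧ x < m ∧ 2 < PySem.Str.len (ys.getD (x - (s + 1)) ""))
          ↔ (s ≤ x ∧ x - s < (y :: ys).length ∧ x < m ∧ 2 < PySem.Str.len (ys.getD (x - (s + 1)) "")) := by
        intro m
        simp only [List.length_cons]
        constructor
        · rintro ⟨a, b, c, d⟩; exact ⟨by omega, by omega, c, d⟩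
        · rintro ⟨a, b, c, d⟩; exact ⟨by omega, by omega, c, d⟩
      by_cases hq : 2 < PySem.Str.len y
      · simp only [if_pos hq, PySem.List.pySetD_natCast]
        rw [ih]
        simp only [List.length_set, List.getElem?_set, show ¬ (s = x) by omega, if_false]
        rw [hgd]
        exact if_congr (hiff fl.length) rfl rfl
      · simp only [if_neg hq]
        rw [ih, hgd]
        exact if_congr (hiff fl.length) rfl rfl

theorem pv_length_pvPass (n : Nat) (fl cand : List String) :
    (pvPass n fl cand).length = fl.length := pv_length_sweep _ _ _

-- one sweep, pointwise, at x < n with the take n collapsed away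
theorem pv_pvPass_getElem? (n : Nat) (fl cand : List String) (x : Nat) (hx : x < n) :
    (pvPass n fl cand)[x]? =
      if x < fl.length ∧ 2 < PySem.Str.len (cand.getD x "") then some (cand.getD x "")
      else fl[x]? := by
  unfold pvPass
  have h0 : (0 : Int) = ((0 : Nat) : Int) := rfl
  rw [h0, pv_sweep_getElem?]
  have hget : (cand.take n).getD (x - 0) "" = cand.getD x "" := by
    simp only [Nat.sub_zero, List.getD_eq_getElem?_getD]
    by_cases h : x < cand.length
    · rw [List.getElem?_take_of_lt hx]
    · rw [List.getElem?_take]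
      rw [if_pos hx, List.getElem?_eq_none (by omega)]
  rw [hget]
  by_cases hlen : x < cand.length
  · have h1 : x - 0 < (cand.take n).length := by
      simp only [List.length_take]; omega
    simp only [Nat.zero_le, h1, true_and, Nat.sub_zero]
    split_ifs with a b c <;> tauto
  · have hempty : cand.getD x "" = "" := by
      rw [List.getD_eq_getElem?_getD, List.getElem?_eq_none (by omega)]; rfl
    rw [hempty]
    have hq : ¬ (2 < PySem.Str.len "") := by decide
    simp [hq]

-- B's five sweeps produce exactly the priority pick at each position
theorem pv_final_eq (simp_list ext1 ext2 ext3 ext4 : List String) (n : Nat) :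
    [simp_list, ext3, ext2, ext4, ext1].foldl (pvPass n) (List.replicate n "")
    = (List.range n).map (pvPick simp_list ext1 ext2 ext3 ext4) := by
  have hlen : ([simp_list, ext3, ext2, ext4, ext1].foldl (pvPass n) (List.replicate n "")).length = n := by
    simp only [List.foldl_cons, List.foldl_nil, pv_length_pvPass, List.length_replicate]
  apply List.ext_getElem?
  intro x
  by_cases hx : x < n
  · simp only [List.foldl_cons, List.foldl_nil] at hlen ⊢
    rw [pv_pvPass_getElem? n _ ext1 x hx, pv_pvPass_getElem? n _ ext4 x hx,
        pv_pvPass_getElem? n _ ext2 x hx, pv_pvPass_getElem? n _ ext3 x hx,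
        pv_pvPass_getElem? n _ simp_list x hx]
    have hL4 : (pvPass n (List.replicate n "") simp_list).length = n := by
      simp [pv_length_pvPass]
    have hL3 : (pvPass n (pvPass n (List.replicate n "") simp_list) ext3).length = n := by
      simp [pv_length_pvPass, hL4]
    have hL2 : (pvPass n (pvPass n (pvPass n (List.replicate n "") simp_list) ext3) ext2).length = n := by
      simp [pv_length_pvPass, hL3]
    have hL1 : (pvPass n (pvPass n (pvPass n (pvPass n (List.replicate n "") simp_list) ext3) ext2) ext4).length = n := by
      simp [pv_length_pvPass, hL2]
    rw [hL1, hL2, hL3, hL4]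
    have hrep : (List.replicate n (α := String) "")[x]? = some "" := by
      simp [List.getElem?_replicate, hx]
    have hmap : ((List.range n).map (pvPick simp_list ext1 ext2 ext3 ext4))[x]? = some (pvPick simp_list ext1 ext2 ext3 ext4 x) := by
      rw [List.getElem?_map, List.getElem?_range hx]; rfl
    rw [hmap, List.length_replicate, hrep]
    unfold pvPick
    simp only [List.find?]
    simp only [List.getD_eq_getElem?_getD]
    by_cases h1 : 2 < (ext1[x]?.getD "").length
    · simp [hx, h1]
    · by_cases h4 : 2 < (ext4[x]?.getD "").length
      · simp [hx, h1, h4]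
      · by_cases h2 : 2 < (ext2[x]?.getD "").length
        · simp [hx, h1, h4, h2]
        · by_cases h3 : 2 < (ext3[x]?.getD "").length
          · simp [hx, h1, h4, h2, h3]
          · by_cases hs : 2 < (simp_list[x]?.getD "").length
            · simp [hx, h1, h4, h2, h3, hs]
            · simp [hx, h1, h4, h2, h3, hs]
  · rw [List.getElem?_eq_none (by rw [hlen]; omega),
        List.getElem?_eq_none (by simp only [List.length_map, List.length_range]; omega)]

-- zipping ori with an index-defined list pairs each surviving index with its ori entry
theorem pv_zip_map_range (ori : List String) (f : Nat → String) (n : Nat) :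
    ori.zip ((List.range n).map f)
    = (List.range (min ori.length n)).map (fun i => (ori.getD i "", f i)) := by
  induction ori generalizing n f with
  | nil => simp
  | cons o ori ih =>
    cases n with
    | zero => simp
    | succ m =>
      rw [List.range_succ_eq_map, List.map_cons, List.zip_cons_cons, List.map_map, ih]
      have hmin : min (o :: ori).length (m + 1) = min ori.length m + 1 := by
        simp only [List.length_cons]; omega
      rw [hmin, List.range_succ_eq_map, List.map_cons, List.map_map]
      congr 1

-- B's zip-and-filter rederivation of noExt equals A's fallback recording, given that every
-- no-candidate index is inside ori (which Pre_extract2 supplies)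
theorem pv_noext_eq (ori : List String) (f : Nat → String) (n : Nat)
    (h : ∀ x, x < n → f x = "" → x < ori.length) :
    ((ori.zip ((List.range n).map f)).filter (fun p => p.2 == "")).map Prod.fst
    = ((List.range n).filter (fun x => f x == "")).map (fun x => ori.getD x "") := by
  rw [pv_zip_map_range, List.filter_map, List.map_map]
  have hsplit : List.range n
      = List.range (min ori.length n) ++ (List.range (n - min ori.length n)).map (fun i => min ori.length n + i) := by
    conv_lhs => rw [show n = min ori.length n + (n - min ori.length n) by omega]
    rw [List.range_add]
  conv_rhs => rw [hsplit]
  rw [List.filter_append]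
  have htail : ((List.range (n - min ori.length n)).map (fun i => min ori.length n + i)).filter
      (fun x => f x == "") = [] := by
    rw [List.filter_eq_nil_iff]
    intro a ha
    simp only [List.mem_map, List.mem_range] at ha
    obtain ⟨i, hi, rfl⟩ := ha
    intro hfa
    simp only [beq_iff_eq] at hfa
    have := h _ (by omega) hfa
    omega
  rw [htail, List.append_nil]
  have hpred : ∀ i, ((fun p => p.2 == "") ∘ (fun i => (ori.getD i "", f i))) i = (f i == "") := by
    intro i; rfl
  rw [List.filter_congr (fun i _ => hpred i)]
  apply List.map_congr_left
  intro i hi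
  rfl

-- ===== VERDICT (by name: the statement is the Claim_ definition above) =====
theorem extract2_spec : Claim_equal_extract2 := by
  intro ori simp_list ext1 ext2 ext3 ext4 _ hpre
  unfold Spec_extract2 extract2 extract2_alt
  dsimp only
  rw [pv_loop_eq, pv_final_eq]
  have hpick : ∀ x, x < ext1.length → pvPick simp_list ext1 ext2 ext3 ext4 x = "" → x < ori.length := by
    intro x hx hp
    have hchain := hpre x hx
    unfold pvPick at hp
    cases hfind : ([ext1.getD x "", ext4.getD x "", ext2.getD x "", ext3.getD x "", simp_list.getD x ""].find?
        (fun c => decide (2 < PySem.Str.len c))) with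
    | some c =>
      rw [hfind] at hp
      have hc := List.find?_some hfind
      simp only [decide_eq_true_eq] at hc
      simp only [Option.getD_some] at hp
      rw [hp] at hc
      exact absurd hc (by decide)
    | none =>
      have hall := List.find?_eq_none.mp hfind
      simp only [List.mem_cons, List.not_mem_nil, decide_eq_true_eq] at hall
      have n1 : ¬ 2 < PySem.Str.len (ext1.getD x "") := hall _ (by simp)
      have n4 : ¬ 2 < PySem.Str.len (ext4.getD x "") := hall _ (by simp)
      have n2 : ¬ 2 < PySem.Str.len (ext2.getD x "") := hall _ (by simp)
      have n3 : ¬ 2 < PySem.Str.len (ext3.getD x "") := hall _ (by simp)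
      have ns : ¬ 2 < PySem.Str.len (simp_list.getD x "") := hall _ (by simp)
      tauto
  rw [pv_noext_eq ori _ ext1.length hpick]
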